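-- pv_equiv track=rewrite | github.com/gedaskir/qmeq | qmeq/indexing.py | enum_szlst
-- ===== SOURCE A (Python) =====
-- def szrange(charge, nsingle):
--     """
--     Make a list giving :math:`S_{z}` values for given charge.
--
--     Parameters
--     ----------
--     charge : int
--         Value of the charge.
--     nsingle : int
--         Number of single particle states.
--
--     Returns
--     -------
--     list
--         List containing :math:`S_{z}` values for given charge.
--     """
--     szmax = min(charge, nsingle-charge)
--     return list(range(-szmax, szmax+1, +2))
--
-- def empty_szlst(nsingle, noneq=False):
--     """
--     Make an empty list of lists corresponding to different charges and :math:`S_{z}` values.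
--
--     Parameters
--     ----------
--     nsingle : int
--         Number of single particle states.
--     noneq : bool
--         If True the list contains None objects.
--         If False the list contains empty lists [].
--
--     Returns
--     -------
--     list of lists
--         Contains None objects or [].
--     """
--     ncharge = nsingle+1
--     if noneq:
--         return [[None for _ in szrange(i, nsingle)] for i in range(ncharge)]
--     else:
--         return [[[] for _ in szrange(i, nsingle)] for i in range(ncharge)]
--
-- def enum_szlst(szlst_lin):
--     """
--     Make a list of integers from 0 to 2^nsingle having nesting of szlst_lin.
--
--     Parameters
--     ----------
--     szlst_lin : list of lists of lists
--         Constructed by construct_szlst(nsingle).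
--
--     Returns
--     -------
--     szlst : list of lists of lists
--     """
--     ncharge = len(szlst_lin)
--     nsingle = ncharge-1
--     szlst = empty_szlst(nsingle)
--     # [[[] for j in szrange(i, nsingle)] for i in range(ncharge)]
--     counter1 = 0
--     for j1 in range(ncharge):
--         for j2 in range(len(szlst_lin[j1])):
--             counter2 = counter1 + len(szlst_lin[j1][j2])
--             szlst[j1][j2] = list(range(counter1, counter2))
--             counter1 = counter2
--     return szlst
-- ===== SOURCE B (Python) =====
-- def szrange(charge, nsingle):
--     szmax = min(charge, nsingle - charge)
--     return list(range(-szmax, szmax + 1, 2))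
--
-- def enum_szlst(szlst_lin):
--     """Enumerate 0,1,2,... into the charge/Sz structure in two passes: first a
--     flat prefix-sum table of all cell lengths, then one output row per charge
--     holding a cell per Sz value, sliced from consecutive offsets; Sz sectors
--     with no linear data hold the empty enumeration."""
--     nsingle = len(szlst_lin) - 1
--     offs = [0]
--     for row in szlst_lin:
--         for cell in row:
--             offs.append(offs[-1] + len(cell))
--     out = []
--     k = 0
--     for charge, row in enumerate(szlst_lin):
--         cells = [list(range(offs[k + j], offs[k + j + 1])) if j < len(row) else []
--                  for j in range(len(szrange(charge, nsingle)))]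
--         k += len(row)
--         out.append(cells)
--     return out
-- ===== Notes on version B (the rewrite author's own statement) =====
-- stated objective: alternative
-- what changed: Replaces A's preallocated empty_szlst template mutated in place under a threaded running counter with a two-pass scheme: a flat prefix-sum offset table of all cell lengths is built first, then a second pass emits one fresh row per charge with a cell per Sz value, slicing consecutive offsets from the table; Pre_ excludes exactly the inputs (a charge row longer than its szrange) on which A raises IndexError.
import Mathlib
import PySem

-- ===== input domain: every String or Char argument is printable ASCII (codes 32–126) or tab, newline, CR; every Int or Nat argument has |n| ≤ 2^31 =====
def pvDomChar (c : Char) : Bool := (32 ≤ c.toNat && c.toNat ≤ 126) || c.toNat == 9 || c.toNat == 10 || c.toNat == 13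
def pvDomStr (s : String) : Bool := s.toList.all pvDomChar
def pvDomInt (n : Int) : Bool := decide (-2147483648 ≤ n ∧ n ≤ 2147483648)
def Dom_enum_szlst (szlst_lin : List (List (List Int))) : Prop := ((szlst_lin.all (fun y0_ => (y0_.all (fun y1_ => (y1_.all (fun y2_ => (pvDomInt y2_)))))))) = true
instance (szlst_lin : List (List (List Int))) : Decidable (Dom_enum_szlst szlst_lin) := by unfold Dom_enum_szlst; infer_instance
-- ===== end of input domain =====

-- B replaces A's in-place-mutated empty_szlst template and threaded running counter by a
-- prefix-sum offset table built first and a separate per-charge emission pass (alternative decomposition).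

-- ===== PORT A =====
-- szrange(charge, nsingle) — also used verbatim by Source B
def pvSzrange (charge nsingle : Int) : List Int :=
  let szmax := min charge (nsingle - charge)
  PySem.List.pyRange (-szmax) (szmax + 1) 2

-- empty_szlst(nsingle) at its only call site (noneq=False)
def pvEmptySzlst (nsingle : Int) : List (List (List Int)) :=
  (PySem.List.pyRange 0 (nsingle + 1) 1).map
    (fun i => (pvSzrange i nsingle).map (fun _ => ([] : List Int)))

-- body of the outer 'for j1 in range(ncharge)' loop: the inner 'for j2' loop over the row;
-- the list assignment szlst[j1][j2] = … is pySetD (both indices are in range under Pre_)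
def pvAInner (szlst_lin : List (List (List Int)))
    (st : List (List (List Int)) × Int) (j1 : Int) : List (List (List Int)) × Int :=
  (PySem.List.pyRange 0 (PySem.List.len (PySem.List.pyGetD szlst_lin j1 [])) 1).foldl
    (fun st j2 =>
      let counter2 := st.2 +
        PySem.List.len (PySem.List.pyGetD (PySem.List.pyGetD szlst_lin j1 []) j2 [])
      (PySem.List.pySetD st.1 j1
         (PySem.List.pySetD (PySem.List.pyGetD st.1 j1 []) j2
            (PySem.List.pyRange st.2 counter2 1)),
       counter2))
    st

def enum_szlst (szlst_lin : List (List (List Int))) : List (List (List Int)) :=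
  let ncharge : Int := PySem.List.len szlst_lin
  let nsingle : Int := ncharge - 1
  ((PySem.List.pyRange 0 ncharge 1).foldl (pvAInner szlst_lin) (pvEmptySzlst nsingle, 0)).1

-- ===== PORT B =====
-- one (charge, row) step of the emission loop; st = (out, k)
def pvAltStep (nsingle : Int) (offs : List Int)
    (st : List (List (List Int)) × Int) (p : Int × List (List Int)) :
    List (List (List Int)) × Int :=
  let charge := p.1
  let row := p.2
  let k := st.2
  let cells := (PySem.List.pyRange 0 (PySem.List.len (pvSzrange charge nsingle)) 1).map
    (fun j => if j < PySem.List.len row then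
        PySem.List.pyRange (PySem.List.pyGetD offs (k + j) 0)
                           (PySem.List.pyGetD offs (k + j + 1) 0) 1
      else [])
  (st.1 ++ [cells], k + PySem.List.len row)

def enum_szlst_alt (szlst_lin : List (List (List Int))) : List (List (List Int)) :=
  let nsingle : Int := PySem.List.len szlst_lin - 1
  let offs : List Int :=
    szlst_lin.foldl (fun offs row =>
      row.foldl (fun offs cell =>
        offs ++ [PySem.List.pyGetD offs (-1) 0 + PySem.List.len cell]) offs) [0]
  ((PySem.List.enumerate szlst_lin).foldl (pvAltStep nsingle offs) ([], 0)).1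

-- ===== PRECONDITION & SPEC =====
-- Pre_ excludes exactly the inputs on which A raises IndexError: those with a charge row
-- longer than the corresponding row of the canonical empty_szlst template it writes into.
def Pre_enum_szlst (szlst_lin : List (List (List Int))) : Prop :=
  ∀ j1 : Nat, j1 < szlst_lin.length →
    (szlst_lin.getD j1 []).length ≤ min j1 (szlst_lin.length - 1 - j1) + 1
instance (szlst_lin : List (List (List Int))) : Decidable (Pre_enum_szlst szlst_lin) := by
  unfold Pre_enum_szlst; infer_instance

def pvWitness_enum_szlst : List (List (List Int)) := [[[5]], [[], [1, 2]], [[3]]]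

def Spec_enum_szlst (szlst_lin : List (List (List Int))) (out : List (List (List Int))) : Prop := out = enum_szlst_alt szlst_lin
instance (szlst_lin : List (List (List Int))) (out : List (List (List Int))) : Decidable (Spec_enum_szlst szlst_lin out) := by unfold Spec_enum_szlst; infer_instance

-- ===== CLAIM (what is proved, stated in full; the proofs are below) =====
def Claim_equal_enum_szlst : Prop := ∀ (szlst_lin : List (List (List Int))), Dom_enum_szlst szlst_lin → Pre_enum_szlst szlst_lin → Spec_enum_szlst szlst_lin (enum_szlst szlst_lin)

-- ===== LEMMAS AND PROOFS =====

-- common reference form both ports are reduced to: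
-- pvFill fills one row with consecutive ranges starting at c, pvRow pads it, pvGo walks the rows
def pvFill (c : Int) : List (List Int) → List (List Int)
  | [] => []
  | cell :: rest =>
      PySem.List.pyRange c (c + (cell.length : Int)) 1 :: pvFill (c + (cell.length : Int)) rest

def pvCnt (row : List (List Int)) : Int := (row.map (fun c => (c.length : Int))).sum

def pvRow (n j1 c : Int) (row : List (List Int)) : List (List Int) :=
  pvFill c row ++ List.replicate ((min j1 (n - j1) + 1).toNat - row.length) []

def pvGo (n : Int) (j1 c : Int) : List (List (List Int)) → List (List (List Int))
  | [] => []
  | row :: rest => pvRow n j1 c row :: pvGo n (j1 + 1) (c + pvCnt row) rest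

def pvLens (l : List (List (List Int))) : List Int :=
  l.flatMap (fun row => row.map (fun c => (c.length : Int)))

def pvCntAll (l : List (List (List Int))) : Int := (l.map pvCnt).sum

-- prefix-sum table: pvPref s xs = [s, s+x0, s+x0+x1, …]
def pvPref (s : Int) : List Int → List Int
  | [] => [s]
  | x :: xs => s :: pvPref (s + x) xs

def pvBody (s : Int) : List Int → List Int
  | [] => []
  | x :: xs => s :: pvBody (s + x) xs

theorem pvPref_eq (s : Int) (xs : List Int) : pvPref s xs = pvBody s xs ++ [s + xs.sum] := by
  induction xs generalizing s with
  | nil => simp [pvPref, pvBody]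
  | cons x xs ih => simp [pvPref, pvBody, ih, add_assoc]

theorem pvBody_append (s : Int) (xs ys : List Int) :
    pvBody s (xs ++ ys) = pvBody s xs ++ pvBody (s + xs.sum) ys := by
  induction xs generalizing s with
  | nil => simp [pvBody]
  | cons x xs ih => simp [pvBody, ih, add_assoc]

theorem pvPref_getD (s : Int) (xs : List Int) (i : Nat) (h : i ≤ xs.length) :
    (pvPref s xs).getD i 0 = s + (xs.take i).sum := by
  induction xs generalizing s i with
  | nil => simp at h; subst h; simp [pvPref]
  | cons x xs ih =>
    cases i with
    | zero => simp [pvPref]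
    | succ i =>
      simp only [List.length_cons, Nat.succ_le_succ_iff] at h
      have := ih (s + x) i h
      show (pvPref (s + x) xs).getD i 0 = s + (List.take (i + 1) (x :: xs)).sum
      rw [this]; simp; ring

theorem pvOffs_row (row : List (List Int)) (init : List Int) (s : Int) :
    row.foldl (fun offs cell =>
        offs ++ [PySem.List.pyGetD offs (-1) 0 + PySem.List.len cell]) (init ++ [s])
      = init ++ pvPref s (row.map (fun c => (c.length : Int))) := by
  induction row generalizing init s with
  | nil => simp [pvPref]
  | cons cell rest ih =>
    rw [List.foldl_cons]
    have h1 : PySem.List.pyGetD (init ++ [s]) (-1) 0 + PySem.List.len cell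
        = s + (cell.length : Int) := by
      simp [PySem.List.pyGetD_neg_one_append_singleton]
    rw [h1, ih (init ++ [s]) (s + (cell.length : Int))]
    simp [pvPref]

theorem pvOffs_eq (l : List (List (List Int))) (init : List Int) (s : Int) :
    l.foldl (fun offs row =>
        row.foldl (fun offs cell =>
          offs ++ [PySem.List.pyGetD offs (-1) 0 + PySem.List.len cell]) offs) (init ++ [s])
      = init ++ pvPref s (pvLens l) := by
  induction l generalizing init s with
  | nil => simp [pvLens, pvPref]
  | cons row rest ih =>
    simp only [List.foldl_cons]
    rw [pvOffs_row row init s, pvPref_eq]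
    rw [← List.append_assoc, ih _ _]
    simp [pvLens, pvPref_eq, pvBody_append, add_assoc]

theorem pvFill_eq_map (row : List (List Int)) (c : Int) :
    pvFill c row = (List.range row.length).map
      (fun i => PySem.List.pyRange (c + (((row.map (fun x => (x.length : Int))).take i).sum))
                                   (c + (((row.map (fun x => (x.length : Int))).take (i + 1)).sum)) 1) := by
  induction row generalizing c with
  | nil => simp [pvFill]
  | cons cell rest ih =>
    rw [List.length_cons, List.range_succ_eq_map, List.map_cons, List.map_map]
    rw [pvFill, ih (c + (cell.length : Int))]
    congr 1
    · simp
    · apply List.map_congr_left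
      intro i _
      simp [List.take_succ_cons, add_assoc]

theorem pvCells_eq (row : List (List Int)) (L1 Lrest : List Int) :
    ((PySem.List.pyRange 0 (PySem.List.len row) 1).map
      (fun j2 => PySem.List.pyRange
        (PySem.List.pyGetD (pvPref 0 (L1 ++ (row.map (fun c => (c.length : Int)) ++ Lrest))) ((L1.length : Int) + j2) 0)
        (PySem.List.pyGetD (pvPref 0 (L1 ++ (row.map (fun c => (c.length : Int)) ++ Lrest))) ((L1.length : Int) + j2 + 1) 0) 1))
    = pvFill L1.sum row := by
  have h1 : ∀ (j : Nat), j ≤ row.length →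
      PySem.List.pyGetD (pvPref 0 (L1 ++ (row.map (fun c => (c.length : Int)) ++ Lrest)))
        ((L1.length : Int) + (j : Int)) 0
      = L1.sum + ((row.map (fun c => (c.length : Int))).take j).sum := by
    intro j hj
    have hc : ((L1.length : Int) + (j : Int)) = ((L1.length + j : Nat) : Int) := by push_cast; ring
    rw [hc, PySem.List.pyGetD_natCast]
    have h2 := pvPref_getD 0 (L1 ++ (row.map (fun c => (c.length : Int)) ++ Lrest))
      (L1.length + j) (by simp; omega)
    simp only [List.getD] at h2 ⊢
    rw [h2, List.take_append, List.take_of_length_le (by omega), List.sum_append,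
        List.take_append_of_le_length (by simpa using hj)]
    simp
  rw [PySem.List.len_eq, PySem.List.pyRange_zero_nat, List.map_map,
      pvFill_eq_map row L1.sum]
  apply List.map_congr_left
  intro i hi
  simp only [List.mem_range] at hi
  show PySem.List.pyRange
      (PySem.List.pyGetD _ ((L1.length : Int) + (i : Int)) 0)
      (PySem.List.pyGetD _ ((L1.length : Int) + (i : Int) + 1) 0) 1 = _
  have hc2 : ((L1.length : Int) + (i : Int) + 1) = ((L1.length : Int) + ((i + 1 : Nat) : Int)) := by
    push_cast; ring
  rw [hc2, h1 i (le_of_lt hi), h1 (i + 1) hi]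

-- length of szrange(j, n) for 0 ≤ j ≤ n
theorem pvSzrange_length (j n : Int) (h0 : 0 ≤ j) (h1 : j ≤ n) :
    (pvSzrange j n).length = (min j (n - j) + 1).toNat := by
  have hm : 0 ≤ min j (n - j) := by omega
  unfold pvSzrange
  rw [PySem.List.pyRange_of_pos _ _ (by norm_num), List.length_map, List.length_range,
      if_pos (by omega)]
  omega

-- the cells comprehension of B, for a row no longer than its skeleton
theorem pvCells_eq' (row : List (List Int)) (L1 Lrest : List Int) (sk : Nat)
    (hle : row.length ≤ sk) :
    ((PySem.List.pyRange 0 (sk : Int) 1).map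
      (fun j => if j < PySem.List.len row then
          PySem.List.pyRange
            (PySem.List.pyGetD (pvPref 0 (L1 ++ (row.map (fun c => (c.length : Int)) ++ Lrest))) ((L1.length : Int) + j) 0)
            (PySem.List.pyGetD (pvPref 0 (L1 ++ (row.map (fun c => (c.length : Int)) ++ Lrest))) ((L1.length : Int) + j + 1) 0) 1
        else []))
    = pvFill L1.sum row ++ List.replicate (sk - row.length) [] := by
  obtain ⟨d, rfl⟩ := Nat.exists_eq_add_of_le hle
  have hc := pvCells_eq row L1 Lrest
  rw [PySem.List.len_eq, PySem.List.pyRange_zero_nat, List.map_map] at hc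
  rw [PySem.List.pyRange_zero_nat, List.map_map, List.range_add, List.map_append, List.map_map]
  congr 1
  · rw [← hc]
    apply List.map_congr_left
    intro i hi
    simp only [List.mem_range] at hi
    simp only [Function.comp_apply, PySem.List.len_eq]
    rw [if_pos (by exact_mod_cast hi)]
  · rw [show row.length + d - row.length = d by omega, List.eq_replicate_iff]
    refine ⟨by simp, ?_⟩
    intro b hb
    simp only [List.mem_map, List.mem_range, Function.comp_apply] at hb
    obtain ⟨i, _, hbe⟩ := hb
    rw [PySem.List.len_eq, if_neg (by push_cast; omega)] at hbe
    exact hbe.symm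

-- B's emission fold reduces to pvGo (rows within skeleton bounds)
theorem pvAltGo (n : Int) (rest : List (List (List Int))) :
    ∀ (L1 : List Int) (out : List (List (List Int))) (j1 : Int), 0 ≤ j1 →
    j1 + (rest.length : Int) ≤ n + 1 →
    (∀ i : Nat, i < rest.length →
      ((rest.getD i []).length : Int) ≤ min (j1 + (i : Int)) (n - (j1 + (i : Int))) + 1) →
    ((PySem.List.enumerate rest j1).foldl
        (pvAltStep n (pvPref 0 (L1 ++ pvLens rest))) (out, (L1.length : Int))).1
      = out ++ pvGo n j1 L1.sum rest := by
  induction rest with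
  | nil => intro L1 out j1 _ _ _; simp [PySem.List.enumerate_nil, pvGo]
  | cons row rest ih =>
    intro L1 out j1 h0 hb hrows
    rw [PySem.List.enumerate_cons, List.foldl_cons]
    have hlens : L1 ++ pvLens (row :: rest)
        = (L1 ++ row.map (fun c => (c.length : Int))) ++ pvLens rest := by
      simp [pvLens]
    have hj1n : j1 ≤ n := by
      have := hb; simp only [List.length_cons] at this; push_cast at this; omega
    have hsk : (pvSzrange j1 n).length = (min j1 (n - j1) + 1).toNat :=
      pvSzrange_length j1 n h0 hj1n
    have hrow0 := hrows 0 (by simp)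
    simp only [List.getD, List.getElem?_cons_zero, Option.getD_some, Nat.cast_zero, add_zero]
      at hrow0
    have hrowle : row.length ≤ (min j1 (n - j1) + 1).toNat := by omega
    have hlensz : PySem.List.len (pvSzrange j1 n) = (((min j1 (n - j1) + 1).toNat : Nat) : Int) := by
      rw [PySem.List.len_eq, hsk]
    have hstep : pvAltStep n (pvPref 0 ((L1 ++ row.map (fun c => (c.length : Int))) ++ pvLens rest)) (out, (L1.length : Int)) (j1, row)
        = (out ++ [pvRow n j1 L1.sum row],
           (((L1 ++ row.map (fun c => (c.length : Int))).length : Int))) := by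
      show (out ++ [(PySem.List.pyRange 0 (PySem.List.len (pvSzrange j1 n)) 1).map
          (fun j => if j < PySem.List.len row then
              PySem.List.pyRange
                (PySem.List.pyGetD (pvPref 0 ((L1 ++ row.map (fun c => (c.length : Int))) ++ pvLens rest)) ((L1.length : Int) + j) 0)
                (PySem.List.pyGetD (pvPref 0 ((L1 ++ row.map (fun c => (c.length : Int))) ++ pvLens rest)) ((L1.length : Int) + j + 1) 0) 1
            else [])],
          (L1.length : Int) + PySem.List.len row) = _
      rw [hlensz]
      have hc := pvCells_eq' row L1 (pvLens rest) (min j1 (n - j1) + 1).toNat hrowle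
      rw [← List.append_assoc] at hc
      rw [hc]
      unfold pvRow
      simp [PySem.List.len_eq]
    rw [hlens, hstep, ih (L1 ++ row.map (fun c => (c.length : Int)))
          (out ++ [pvRow n j1 L1.sum row]) (j1 + 1) (by omega)
          (by simp only [List.length_cons] at hb; push_cast at hb ⊢; omega)
          (by intro i hi
              have := hrows (i + 1) (by simpa using Nat.succ_lt_succ hi)
              simp only [List.getD, List.getElem?_cons_succ] at this
              push_cast at this ⊢
              simp only [List.getD] at this ⊢
              have harith : j1 + 1 + (i : Int) = j1 + ((i : Int) + 1) := by ring
              rw [harith]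
              exact this)]
    simp [pvGo, pvCnt]

theorem alt_eq (l : List (List (List Int))) (hPre : Pre_enum_szlst l) :
    enum_szlst_alt l = pvGo ((l.length : Int) - 1) 0 0 l := by
  unfold enum_szlst_alt
  have hoffs : l.foldl (fun offs row =>
      row.foldl (fun offs cell =>
        offs ++ [PySem.List.pyGetD offs (-1) 0 + PySem.List.len cell]) offs) [0]
      = pvPref 0 (pvLens l) := by
    simpa using pvOffs_eq l [] 0
  rw [hoffs, PySem.List.len_eq l]
  have hrows : ∀ i : Nat, i < l.length →
      ((l.getD i []).length : Int) ≤ min ((0 : Int) + (i : Int)) (((l.length : Int) - 1) - ((0 : Int) + (i : Int))) + 1 := by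
    intro i hi
    have := hPre i hi
    omega
  have := pvAltGo ((l.length : Int) - 1) l [] [] 0 (by norm_num) (by push_cast; omega) hrows
  simpa using this

-- A-side
theorem pvGetMid {α : Type} (done : List α) (x d : α) (tail : List α) :
    (done ++ x :: tail).getD done.length d = x := by
  simp [List.getD]

theorem pvSetMid {α : Type} (done : List α) (x v : α) (tail : List α) :
    (done ++ x :: tail).set done.length v = done ++ v :: tail := by
  simp

theorem pvTmplRow (j n : Int) (h0 : 0 ≤ j) (h1 : j ≤ n) :
    (pvSzrange j n).map (fun _ => ([] : List Int))
      = List.replicate (min j (n - j) + 1).toNat [] := by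
  have hm : 0 ≤ min j (n - j) := by omega
  unfold pvSzrange
  rw [PySem.List.pyRange_of_pos _ _ (by norm_num), List.map_map]
  have hcomp : ((fun _ => ([] : List Int)) ∘ fun k : Nat => -min j (n - j) + 2 * (k : Int))
      = (fun _ => ([] : List Int)) := rfl
  rw [hcomp, List.map_const', List.length_range, if_pos (by omega)]
  congr 1
  omega

theorem pvEmptySzlst_eq (L : Nat) :
    pvEmptySzlst ((L : Int) - 1)
      = (List.range L).map
          (fun j : Nat => List.replicate (min ((j : Int)) (((L : Int) - 1) - (j : Int)) + 1).toNat ([] : List Int)) := by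
  unfold pvEmptySzlst
  have h : ((L : Int) - 1) + 1 = (L : Int) := by ring
  rw [h, PySem.List.pyRange_zero_nat, List.map_map]
  apply List.map_congr_left
  intro j hj
  simp only [List.mem_range] at hj
  exact pvTmplRow (j : Int) ((L : Int) - 1) (by omega) (by omega)

theorem pvInnerAux (l : List (List (List Int))) (j m : Nat) (rest : List (List Int)) :
    ∀ (a : Nat) (filled : List (List Int)) (done tail : List (List (List Int))) (c : Int),
    (l.getD j []).drop a = rest → a ≤ (l.getD j []).length → (l.getD j []).length ≤ m →
    filled.length = a → done.length = j →
    (PySem.List.pyRange (a : Int) ((l.getD j []).length : Int) 1).foldl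
      (fun st j2 =>
        let counter2 := st.2 +
          PySem.List.len (PySem.List.pyGetD (PySem.List.pyGetD l (j : Int) []) j2 [])
        (PySem.List.pySetD st.1 (j : Int)
           (PySem.List.pySetD (PySem.List.pyGetD st.1 (j : Int) []) j2
              (PySem.List.pyRange st.2 counter2 1)),
         counter2))
      (done ++ (filled ++ List.replicate (m - a) ([] : List Int)) :: tail, c)
    = (done ++ ((filled ++ pvFill c rest) ++ List.replicate (m - (l.getD j []).length) ([] : List Int)) :: tail,
       c + pvCnt rest) := by
  induction rest with
  | nil =>
    intro a filled done tail c hdrop ha hm hf hd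
    have hlen : (l.getD j []).length ≤ a := by
      have h0 := congrArg List.length hdrop
      simp only [List.length_drop, List.length_nil] at h0; omega
    have ha' : a = (l.getD j []).length := le_antisymm (by omega) hlen
    rw [PySem.List.pyRange_one_eq_nil (by exact_mod_cast hlen)]
    subst ha'
    simp [pvFill, pvCnt]
  | cons cell rest ih =>
    intro a filled done tail c hdrop ha hm hf hd
    have halt : a < (l.getD j []).length := by
      by_contra h
      rw [List.drop_eq_nil_of_le (by omega)] at hdrop
      simp at hdrop
    rw [PySem.List.pyRange_one_cons (by exact_mod_cast halt), List.foldl_cons]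
    have hcell : (l.getD j [])[a]? = some cell := by
      have : ((l.getD j []).drop a)[0]? = some cell := by rw [hdrop]; rfl
      simpa [List.getElem?_drop] using this
    have hgetrow : PySem.List.pyGetD (PySem.List.pyGetD l (j : Int) []) (a : Int) [] = cell := by
      simp only [List.getD] at hcell
      simp only [PySem.List.pyGetD_natCast, List.getD]
      rw [hcell]
      rfl
    have hstate : (done ++ (filled ++ List.replicate (m - a) ([] : List Int)) :: tail).set j
        (((done ++ (filled ++ List.replicate (m - a) ([] : List Int)) :: tail).getD j []).set a
           (PySem.List.pyRange c (c + (cell.length : Int)) 1))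
        = done ++ ((filled ++ [PySem.List.pyRange c (c + (cell.length : Int)) 1])
              ++ List.replicate (m - (a + 1)) ([] : List Int)) :: tail := by
      subst hf hd
      rw [pvGetMid]
      rw [show m - filled.length = (m - (filled.length + 1)) + 1 by omega, List.replicate_succ]
      rw [pvSetMid filled, pvSetMid done]
      simp
    rw [hgetrow, PySem.List.len_eq cell]
    simp only [] at ih ⊢
    have hstep : ∀ (st1 : List (List (List Int))),
        PySem.List.pySetD st1 (j : Int)
          (PySem.List.pySetD (PySem.List.pyGetD st1 (j : Int) []) (a : Int)
             (PySem.List.pyRange c (c + (cell.length : Int)) 1))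
        = st1.set j ((st1.getD j []).set a (PySem.List.pyRange c (c + (cell.length : Int)) 1)) := by
      intro st1; simp [PySem.List.pySetD_natCast, PySem.List.pyGetD_natCast]
    rw [hstep, hstate]
    have hcast : ((a : Int) + 1) = (((a + 1 : Nat)) : Int) := by push_cast; ring
    rw [hcast, ih (a + 1) (filled ++ [PySem.List.pyRange c (c + (cell.length : Int)) 1]) done tail
          (c + (cell.length : Int))
          (by simpa [List.tail_drop] using congrArg List.tail hdrop)
          (by omega) hm (by simp [hf]) hd]
    simp [pvFill, pvCnt, List.append_assoc]
    ring

theorem pvGo_length (n : Int) (xs : List (List (List Int))) :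
    ∀ (j1 c : Int), (pvGo n j1 c xs).length = xs.length := by
  induction xs with
  | nil => intro j1 c; rfl
  | cons row rest ih => intro j1 c; simp [pvGo, ih]

theorem pvGo_snoc (n : Int) (xs : List (List (List Int))) :
    ∀ (j1 c : Int) (r : List (List Int)),
    pvGo n j1 c (xs ++ [r]) = pvGo n j1 c xs ++ [pvRow n (j1 + xs.length) (c + pvCntAll xs) r] := by
  induction xs with
  | nil => intro j1 c r; simp [pvGo, pvCntAll]
  | cons row rest ih =>
    intro j1 c r
    simp only [List.cons_append, pvGo, ih]
    simp only [pvCntAll, pvCnt, List.map_cons, List.sum_cons, List.length_cons]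
    push_cast
    have h1 : j1 + 1 + (rest.length : Int) = j1 + ((rest.length : Int) + 1) := by ring
    have h2 : c + (List.map (fun c => (c.length : Int)) row).sum + (List.map pvCnt rest).sum
        = c + ((List.map (fun c => (c.length : Int)) row).sum + (List.map pvCnt rest).sum) := by ring
    rw [h1, h2]

theorem pvOuterAux (l : List (List (List Int))) (hPre : Pre_enum_szlst l) :
    ∀ (j : Nat), j ≤ l.length →
    (List.range j).foldl (fun st (k : Nat) => pvAInner l st (k : Int))
        (pvEmptySzlst ((l.length : Int) - 1), 0)
      = (pvGo ((l.length : Int) - 1) 0 0 (l.take j)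
           ++ (pvEmptySzlst ((l.length : Int) - 1)).drop j,
         pvCntAll (l.take j)) := by
  intro j hj
  induction j with
  | zero => simp [pvGo, pvCntAll]
  | succ j ih =>
    have hj' : j < l.length := by omega
    rw [List.range_succ, List.foldl_append, List.foldl_cons, List.foldl_nil, ih (by omega)]
    set n : Int := (l.length : Int) - 1 with hn
    have htmpl := pvEmptySzlst_eq l.length
    rw [← hn] at htmpl
    have hgetel : (pvEmptySzlst n)[j]'(by rw [htmpl]; simpa using hj')
        = List.replicate (min ((j : Int)) (n - (j : Int)) + 1).toNat ([] : List Int) := by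
      simp [htmpl]
    have hdrop : (pvEmptySzlst n).drop j
        = List.replicate (min ((j : Int)) (n - (j : Int)) + 1).toNat ([] : List Int)
            :: (pvEmptySzlst n).drop (j + 1) := by
      rw [List.drop_eq_getElem_cons (by rw [htmpl]; simpa using hj'), hgetel]
    have hdone : (pvGo n 0 0 (l.take j)).length = j := by
      rw [pvGo_length]; simp [List.length_take]; omega
    set m : Nat := (min ((j : Int)) (n - (j : Int)) + 1).toNat with hm
    have hrowle : (l.getD j []).length ≤ m := by
      have := hPre j hj'
      rw [hm, hn]
      omega
    unfold pvAInner
    rw [hdrop]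
    have hinner := pvInnerAux l j m (l.getD j []) 0 [] (pvGo n 0 0 (l.take j))
      ((pvEmptySzlst n).drop (j + 1)) (pvCntAll (l.take j))
      rfl (by omega) hrowle rfl hdone
    simp only [Nat.cast_zero, List.nil_append, Nat.sub_zero] at hinner
    simp only [PySem.List.len_eq, PySem.List.pyGetD_natCast] at hinner ⊢
    rw [hinner]
    have htake : l.take (j + 1) = l.take j ++ [l.getD j []] := by
      rw [List.take_add_one]
      congr 1
      simp [List.getElem?_eq_getElem hj', List.getD]
    rw [htake, pvGo_snoc]
    have hcnt : pvCntAll (l.take j ++ [l.getD j []])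
        = pvCntAll (l.take j) + pvCnt (l.getD j []) := by
      simp [pvCntAll]
    rw [hcnt]
    have hrow : pvRow n (0 + ((l.take j).length : Int)) (0 + pvCntAll (l.take j)) (l.getD j [])
        = pvFill (pvCntAll (l.take j)) (l.getD j [])
            ++ List.replicate (m - (l.getD j []).length) ([] : List Int) := by
      unfold pvRow
      have hjj : ((l.take j).length : Int) = (j : Int) := by simp [List.length_take]; omega
      rw [hjj, show (0 : Int) + (j : Int) = (j : Int) from by ring]
      congr 1
      · ring_nf
    rw [hrow]
    simp

theorem a_eq (l : List (List (List Int))) (hPre : Pre_enum_szlst l) :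
    enum_szlst l = pvGo ((l.length : Int) - 1) 0 0 l := by
  unfold enum_szlst
  simp only [PySem.List.len_eq]
  rw [PySem.List.pyRange_zero_nat, List.foldl_map]
  rw [pvOuterAux l hPre l.length (le_refl _)]
  have h : (pvEmptySzlst ((l.length : Int) - 1)).length = l.length := by
    rw [pvEmptySzlst_eq]; simp
  simp [h]

-- ===== VERDICT (by name: the statement is the Claim_ definition above) =====
theorem enum_szlst_spec : Claim_equal_enum_szlst := by
  intro l _ hPre
  unfold Spec_enum_szlst
  rw [a_eq l hPre, alt_eq l hPre]
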